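-- pv_equiv track=rewrite | github.com/JadenF-stack/Premier-League-Tracker-Python-CLI-Python-REST-API-Requests | main.py | resolve_team_name
-- ===== SOURCE A (Python) =====
-- from typing import Any, Dict, List, Optional, Tuple
--
-- TEAM_ALIASES = {
--     "man utd": "Manchester United",
--     "manchester utd": "Manchester United",
--     "man united": "Manchester United",
--     "united": "Manchester United",
--     "mufc": "Manchester United",
--     "mu": "Manchester United",
--     "spurs": "Tottenham Hotspur",
--     "wolves": "Wolverhampton Wanderers FC",
-- }
--
-- def normalize_team_query(query: Optional[str]) -> str:
--     """
--     Normalise team name input: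
--     - If blank, default to Manchester United
--     - Apply simple aliases
--     """
--     if not query or not query.strip():
--         return "Manchester United"
--     cleaned = query.strip()
--     return TEAM_ALIASES.get(cleaned.lower(), cleaned)
--
-- def resolve_team_name(user_query: Optional[str], official_names: List[str]) -> str:
--     """
--   I made this because the API only recognises the official team names,
--     but users will type things like "man utd", "spurs", or sometimes just "united".
--
--     This function tries to map whatever the user types to a real team name from the table.
--
--     How it works (simple rules):
--     1) Normalise the input first (strip spaces + aliases + default team if blank)
--     2) Try an exact match (ignoring upper/lowercase)
--     3) If that fails, try a substring match (e.g., "United" contained in "Manchester United")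
--     """
--     # Clean the user input and apply aliases (e.g. "man utd" === "Manchester United")
--     wanted = normalize_team_query(user_query)
--
--     #Exact match first (safest and avoids wrong matches)
--     for name in official_names:
--         if name.lower() == wanted.lower():
--             return name
--
--     # Fallback: substring match (more flexible, but could match multiple teams)
--     matches = [name for name in official_names if wanted.lower() in name.lower()]
--
--     # If there are multiple matches, it chooses the shortest one as a simple "best guess"
--     if matches:
--         matches.sort(key=len)
--         return matches[0]
--
--     # If matching fails here, we show an error message to the user.
--     return wanted
-- ===== SOURCE B (Python) =====
-- from typing import List, Optional
--
-- TEAM_ALIASES = {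
--     "man utd": "Manchester United",
--     "manchester utd": "Manchester United",
--     "man united": "Manchester United",
--     "united": "Manchester United",
--     "mufc": "Manchester United",
--     "mu": "Manchester United",
--     "spurs": "Tottenham Hotspur",
--     "wolves": "Wolverhampton Wanderers FC",
-- }
--
-- def resolve_team_name(user_query: Optional[str], official_names: List[str]) -> str:
--     # normalise: blank -> default team, then apply aliases (the default has no alias)
--     wanted = (user_query or "").strip() or "Manchester United"
--     wanted = TEAM_ALIASES.get(wanted.lower(), wanted)
--     wl = wanted.lower()
--     best = None  # shortest substring match seen so far (first one wins ties)
--     for name in official_names: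
--         nl = name.lower()
--         if nl == wl:
--             return name  # exact match always wins immediately
--         if wl in nl and (best is None or len(name) < len(best)):
--             best = name
--     return best if best is not None else wanted
-- ===== Notes on version B (the rewrite author's own statement) =====
-- stated objective: simpler
-- what changed: Replaces A's two scans (an exact-match loop, then a filter + stable sort by length indexed at 0) with one pass that returns an exact match immediately and keeps the shortest substring match via a strict-< running minimum, so the sort and the intermediate matches list disappear.
import Mathlib
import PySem

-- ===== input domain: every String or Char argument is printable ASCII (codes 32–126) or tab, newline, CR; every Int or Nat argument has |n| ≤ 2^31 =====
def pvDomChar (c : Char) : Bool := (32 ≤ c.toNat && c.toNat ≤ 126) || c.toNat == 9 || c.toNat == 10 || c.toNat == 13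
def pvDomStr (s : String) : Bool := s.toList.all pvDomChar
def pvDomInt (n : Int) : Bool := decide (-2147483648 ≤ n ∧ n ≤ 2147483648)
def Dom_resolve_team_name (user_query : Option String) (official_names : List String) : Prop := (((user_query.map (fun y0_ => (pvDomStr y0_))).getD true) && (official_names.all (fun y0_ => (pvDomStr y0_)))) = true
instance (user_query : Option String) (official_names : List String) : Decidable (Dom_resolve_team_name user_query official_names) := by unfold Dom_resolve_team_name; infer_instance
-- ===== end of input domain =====

-- B fuses A's two scans (exact-match loop, then filter + stable sort by length) into one
-- pass that returns an exact match immediately and tracks the shortest substring match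
-- with a strict-< running minimum; objective: simpler (one traversal, no sort).


-- ===== PORT A =====
def pvAliases : PySem.Dict String String := PySem.Dict.ofList
  [("man utd", "Manchester United"),
   ("manchester utd", "Manchester United"),
   ("man united", "Manchester United"),
   ("united", "Manchester United"),
   ("mufc", "Manchester United"),
   ("mu", "Manchester United"),
   ("spurs", "Tottenham Hotspur"),
   ("wolves", "Wolverhampton Wanderers FC")]

-- normalize_team_query (A's helper): blank -> default, else alias lookup on the stripped, lowered input
def pvNormalize (query : Option String) : String :=
  match query with
  | none => "Manchester United"
  | some s =>
    if s = "" ∨ PySem.Str.strip s = "" then "Manchester United"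
    else
      let cleaned := PySem.Str.strip s
      PySem.Dict.getD pvAliases (PySem.Str.lower cleaned) cleaned

def resolve_team_name (user_query : Option String) (official_names : List String) : String :=
  let wanted := pvNormalize user_query
  -- exact match first (the for-loop with early return = first match)
  match official_names.find? (fun n => PySem.Str.lower n == PySem.Str.lower wanted) with
  | some n => n
  | none =>
    -- fallback: substring matches, stable-sorted by length, shortest first
    let ms := official_names.filter (fun n => PySem.Str.isIn (PySem.Str.lower wanted) (PySem.Str.lower n))
    match PySem.List.sorted ms (fun n => PySem.Str.len n) with
    | m :: _ => m
    | [] => wanted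

-- ===== PORT B =====
-- B's inlined normaliser: (user_query or "").strip() or default, then alias lookup
def pvNormalizeB (user_query : Option String) : String :=
  let w1 := PySem.Str.strip (user_query.getD "")
  let w2 := if w1 = "" then "Manchester United" else w1
  PySem.Dict.getD pvAliases (PySem.Str.lower w2) w2

-- B's single pass: return an exact match at once; keep the strictly shorter substring match
def pvLoopB (wl wanted : String) : List String → Option String → String
  | [], best => best.getD wanted
  | n :: ns, best =>
    if PySem.Str.lower n == wl then n
    else if PySem.Str.isIn wl (PySem.Str.lower n) &&
            (match best with
             | none => true
             | some b => decide (PySem.Str.len n < PySem.Str.len b)) then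
      pvLoopB wl wanted ns (some n)
    else
      pvLoopB wl wanted ns best

def resolve_team_name_alt (user_query : Option String) (official_names : List String) : String :=
  let wanted := pvNormalizeB user_query
  pvLoopB (PySem.Str.lower wanted) wanted official_names none

-- ===== PRECONDITION & SPEC =====
def Spec_resolve_team_name (user_query : Option String) (official_names : List String) (out : String) : Prop := out = resolve_team_name_alt user_query official_names
instance (user_query : Option String) (official_names : List String) (out : String) : Decidable (Spec_resolve_team_name user_query official_names out) := by unfold Spec_resolve_team_name; infer_instance

-- ===== CLAIM (what is proved, stated in full; the proofs are below) =====
def Claim_equal_resolve_team_name : Prop := ∀ (user_query : Option String) (official_names : List String), Dom_resolve_team_name user_query official_names → Spec_resolve_team_name user_query official_names (resolve_team_name user_query official_names)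

-- ===== LEMMAS AND PROOFS =====

-- the two normalisers agree
lemma pvNormalize_eq (q : Option String) : pvNormalize q = pvNormalizeB q := by
  cases q with
  | none => decide
  | some s =>
    by_cases h : PySem.Str.strip s = ""
    · simp [pvNormalize, pvNormalizeB, h]
      decide
    · have hs : ¬ s = "" := by
        intro he; apply h; rw [he]; decide
      simp [pvNormalize, pvNormalizeB, h, hs]

-- running strict minimum-by-length step (the spec-side accumulator both loops realise)
def pvMinStep (best : Option String) (n : String) : Option String :=
  match best with
  | none => some n
  | some b => if PySem.Str.len n < PySem.Str.len b then some n else some b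

-- the head of A's insertion sort is the running first strict minimum
lemma pvHead_foldl_insertBy (ms : List String) : ∀ (acc : List String),
    (ms.foldl (fun a x =>
        PySem.List.insertBy (fun a b => decide (PySem.Str.len a < PySem.Str.len b)) x a) acc).head?
      = ms.foldl pvMinStep acc.head? := by
  induction ms with
  | nil => intro acc; rfl
  | cons x xs ih =>
    intro acc
    have hstep :
        (PySem.List.insertBy (fun a b => decide (PySem.Str.len a < PySem.Str.len b)) x acc).head?
          = pvMinStep acc.head? x := by
      cases acc with
      | nil => simp [PySem.List.insertBy, pvMinStep]
      | cons m t =>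
        simp [PySem.List.insertBy, pvMinStep]
        split <;> simp_all
    simp only [List.foldl_cons, ih, hstep]

-- B's loop = first exact match, else the running minimum over the substring matches
lemma pvLoopB_eq (wl wanted : String) : ∀ (names : List String) (best : Option String),
    pvLoopB wl wanted names best
      = match names.find? (fun n => PySem.Str.lower n == wl) with
        | some n => n
        | none =>
          ((names.filter (fun n => PySem.Str.isIn wl (PySem.Str.lower n))).foldl pvMinStep best).getD wanted := by
  intro names
  induction names with
  | nil => intro best; rfl
  | cons n ns ih =>
    intro best
    by_cases hex : (PySem.Str.lower n == wl) = true
    · simp [pvLoopB, List.find?, hex]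
    · by_cases hsub : PySem.Chars.isIn wl.toList (PySem.Chars.lower n.toList) = true
      · cases best with
        | none =>
          simp [pvLoopB, List.find?, hex, hsub, ih, pvMinStep]
        | some b =>
          by_cases hlt : n.length < b.length
          · simp [pvLoopB, List.find?, hex, hsub, hlt, ih, pvMinStep]
          · simp [pvLoopB, List.find?, hex, hsub, hlt, ih, pvMinStep]
      · simp [pvLoopB, List.find?, hex, hsub, ih]

-- ===== VERDICT (by name: the statement is the Claim_ definition above) =====
theorem resolve_team_name_spec : Claim_equal_resolve_team_name := by
  intro uq names _
  unfold Spec_resolve_team_name resolve_team_name resolve_team_name_alt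
  rw [pvNormalize_eq]
  set W := pvNormalizeB uq with hW
  rw [pvLoopB_eq]
  cases hf : names.find? (fun n => PySem.Str.lower n == PySem.Str.lower W) with
  | some n => simp [hf]
  | none =>
    simp only [hf]
    have hsort := PySem.List.sorted_eq_foldl_insertBy
      (names.filter (fun n => PySem.Str.isIn (PySem.Str.lower W) (PySem.Str.lower n)))
      (fun n => PySem.Str.len n)
    have hhead := pvHead_foldl_insertBy
      (names.filter (fun n => PySem.Str.isIn (PySem.Str.lower W) (PySem.Str.lower n))) []
    rw [← hsort] at hhead
    cases hs : PySem.List.sorted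
        (names.filter (fun n => PySem.Str.isIn (PySem.Str.lower W) (PySem.Str.lower n)))
        (fun n => PySem.Str.len n) with
    | nil =>
      rw [hs] at hhead
      simp only [List.head?_nil] at hhead
      rw [← hhead]
      simp
    | cons m t =>
      rw [hs] at hhead
      simp only [List.head?_nil, List.head?_cons] at hhead
      rw [← hhead]
      simp
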